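-- pv_equiv track=rewrite | github.com/manuelschipper/nah | src/nah/taxonomy.py | _classify_httpie
-- ===== SOURCE A (Python) =====
-- NETWORK_OUTBOUND = "network_outbound"
--
-- NETWORK_WRITE = "network_write"
--
-- _WRITE_METHODS = {"POST", "PUT", "DELETE", "PATCH"}
--
-- _HTTPIE_CMDS = {"http", "https", "xh", "xhs"}
--
-- _HTTPIE_METHODS = {"GET", "POST", "PUT", "DELETE", "PATCH", "HEAD", "OPTIONS"}
--
-- def _classify_httpie(tokens: list[str]) -> str | None:
--     """Flag-dependent: httpie with write indicators → network_write; else → network_outbound."""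
--     if not tokens or tokens[0] not in _HTTPIE_CMDS:
--         return None
--
--     args = tokens[1:]
--     has_form = False
--     has_write_method = False
--     has_data_item = False
--     found_url = False
--
--     for arg in args:
--         # Check for --form / -f
--         if arg == "--form" or arg == "-f":
--             has_form = True
--             continue
--
--         # Skip other flags
--         if arg.startswith("-"):
--             continue
--
--         # First non-flag arg: check if it's an uppercase method
--         if not found_url and arg.upper() in _HTTPIE_METHODS:
--             if arg.upper() in _WRITE_METHODS:
--                 has_write_method = True
--             continue
--
--         if not found_url:
--             found_url = True
--             continue
--
--         # After URL: check for data item patterns (key=value, key:=value, key@file)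
--         if "=" in arg or ":=" in arg or "@" in arg:
--             has_data_item = True
--
--     if has_write_method:
--         return NETWORK_WRITE
--     if has_form:
--         return NETWORK_WRITE
--     if has_data_item:
--         return NETWORK_WRITE
--     return NETWORK_OUTBOUND
-- ===== SOURCE B (Python) =====
-- NETWORK_OUTBOUND = "network_outbound"
-- NETWORK_WRITE = "network_write"
-- _WRITE_METHODS = {"POST", "PUT", "DELETE", "PATCH"}
-- _HTTPIE_CMDS = {"http", "https", "xh", "xhs"}
-- _HTTPIE_METHODS = {"GET", "POST", "PUT", "DELETE", "PATCH", "HEAD", "OPTIONS"}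
--
--
-- def _classify_httpie(tokens: list[str]) -> str | None:
--     """Flag-dependent: httpie with write indicators -> network_write; else -> network_outbound."""
--     if not tokens or tokens[0] not in _HTTPIE_CMDS:
--         return None
--     args = tokens[1:]
--
--     has_form = any(a == "--form" or a == "-f" for a in args)
--     positionals = [a for a in args if not a.startswith("-")]
--
--     # consume leading method tokens (before the URL)
--     i = 0
--     has_write_method = False
--     while i < len(positionals) and positionals[i].upper() in _HTTPIE_METHODS:
--         if positionals[i].upper() in _WRITE_METHODS:
--             has_write_method = True
--         i += 1
--
--     # positionals[i] (if present) is the URL; data items come after it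
--     has_data_item = any("=" in a or "@" in a for a in positionals[i + 1:])
--
--     if has_write_method or has_form or has_data_item:
--         return NETWORK_WRITE
--     return NETWORK_OUTBOUND
-- ===== Notes on version B (the rewrite author's own statement) =====
-- stated objective: simpler
-- what changed: Replaces the single stateful loop with four booleans and a found_url flag by a flag/positional partition: has_form is one any() over args, a while loop consumes the leading method tokens from the positionals, the next positional is the URL, and data items are one any() over the remainder.
import Mathlib
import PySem

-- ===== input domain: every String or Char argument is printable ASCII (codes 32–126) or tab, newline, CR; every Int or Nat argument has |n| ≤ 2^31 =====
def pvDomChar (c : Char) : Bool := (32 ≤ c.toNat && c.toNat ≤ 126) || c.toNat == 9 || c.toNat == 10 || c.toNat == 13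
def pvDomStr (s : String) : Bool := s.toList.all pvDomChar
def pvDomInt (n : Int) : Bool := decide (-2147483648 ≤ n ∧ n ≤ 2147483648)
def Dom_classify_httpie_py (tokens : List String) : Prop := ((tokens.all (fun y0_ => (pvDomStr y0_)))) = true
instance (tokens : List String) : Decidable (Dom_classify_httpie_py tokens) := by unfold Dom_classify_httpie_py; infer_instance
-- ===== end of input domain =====

-- B replaces A's single stateful loop (four booleans + a found_url flag) by a flag/positional
-- partition: one any() for --form, a while loop consuming leading method positionals, the next
-- positional as URL, and one any() over the remaining positionals — objective: simpler.

-- ===== PORT A =====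
def pvHttpieCmds : List String := ["http", "https", "xh", "xhs"]
def pvHttpieMethods : List String := ["GET", "POST", "PUT", "DELETE", "PATCH", "HEAD", "OPTIONS"]
def pvWriteMethods : List String := ["POST", "PUT", "DELETE", "PATCH"]

-- state = (has_form, has_write_method, has_data_item, found_url)
def pvAStep (s : Bool × Bool × Bool × Bool) (arg : String) : Bool × Bool × Bool × Bool :=
  if arg = "--form" ∨ arg = "-f" then (true, s.2.1, s.2.2.1, s.2.2.2)
  else if PySem.Str.startswith arg "-" then s
  else if s.2.2.2 = false ∧ pvHttpieMethods.contains (PySem.Str.upper arg) then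
    (s.1, s.2.1 || pvWriteMethods.contains (PySem.Str.upper arg), s.2.2.1, s.2.2.2)
  else if s.2.2.2 = false then (s.1, s.2.1, s.2.2.1, true)
  else if PySem.Str.isIn "=" arg || PySem.Str.isIn ":=" arg || PySem.Str.isIn "@" arg then
    (s.1, s.2.1, true, s.2.2.2)
  else s

def classify_httpie_py (tokens : List String) : Option String :=
  match tokens with
  | [] => none
  | t0 :: args =>
    if pvHttpieCmds.contains t0 then
      let r := args.foldl pvAStep (false, false, false, false)
      if r.2.1 then some "network_write"
      else if r.1 then some "network_write"
      else if r.2.2.1 then some "network_write"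
      else some "network_outbound"
    else none

-- ===== PORT B =====
-- the while loop of Source B: consume leading method positionals, accumulating has_write_method
def pvBConsume (ps : List String) (hw : Bool) : Bool × List String :=
  match ps with
  | [] => (hw, [])
  | p :: rest =>
    if pvHttpieMethods.contains (PySem.Str.upper p) then
      pvBConsume rest (hw || pvWriteMethods.contains (PySem.Str.upper p))
    else (hw, p :: rest)

def pvBData (a : String) : Bool := PySem.Str.isIn "=" a || PySem.Str.isIn "@" a

def classify_httpie_py_alt (tokens : List String) : Option String :=
  match tokens with
  | [] => none
  | t0 :: args =>
    if pvHttpieCmds.contains t0 then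
      let has_form := args.any (fun a => a = "--form" || a = "-f")
      let positionals := args.filter (fun a => !(PySem.Str.startswith a "-"))
      let r := pvBConsume positionals false
      let has_data := match r.2 with | [] => false | _ :: t => t.any pvBData
      if r.1 || has_form || has_data then some "network_write" else some "network_outbound"
    else none

-- ===== PRECONDITION & SPEC =====
def Spec_classify_httpie_py (tokens : List String) (out : Option String) : Prop := out = classify_httpie_py_alt tokens
instance (tokens : List String) (out : Option String) : Decidable (Spec_classify_httpie_py tokens out) := by unfold Spec_classify_httpie_py; infer_instance

-- ===== CLAIM (what is proved, stated in full; the proofs are below) =====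
def Claim_equal_classify_httpie_py : Prop := ∀ (tokens : List String), Dom_classify_httpie_py tokens → Spec_classify_httpie_py tokens (classify_httpie_py tokens)

-- ===== LEMMAS AND PROOFS =====

def pvAData (a : String) : Bool :=
  PySem.Str.isIn "=" a || PySem.Str.isIn ":=" a || PySem.Str.isIn "@" a

def pvAnyForm (args : List String) : Bool := args.any (fun a => a = "--form" || a = "-f")
def pvPositionals (args : List String) : List String :=
  args.filter (fun a => !(PySem.Str.startswith a "-"))

lemma pvColon_imp (a : String) (h : PySem.Str.isIn ":=" a = true) :
    PySem.Str.isIn "=" a = true := by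
  rw [PySem.Str.isIn_iff_infix] at h ⊢
  exact List.IsInfix.trans (by decide) h

lemma pvAData_eq_bData (a : String) : pvAData a = pvBData a := by
  unfold pvAData pvBData
  cases hc : PySem.Str.isIn ":=" a
  · rw [Bool.or_false]
  · rw [pvColon_imp a hc]
    simp

-- unfolding lemmas for A's loop body, one per branch
lemma pvStep_form (hf hw hd fu : Bool) (arg : String)
    (h : arg = "--form" ∨ arg = "-f") :
    pvAStep (hf, hw, hd, fu) arg = (true, hw, hd, fu) := by
  unfold pvAStep; rw [if_pos h]

lemma pvStep_flag (hf hw hd fu : Bool) (arg : String)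
    (h1 : ¬(arg = "--form" ∨ arg = "-f")) (h2 : PySem.Str.startswith arg "-" = true) :
    pvAStep (hf, hw, hd, fu) arg = (hf, hw, hd, fu) := by
  unfold pvAStep; rw [if_neg h1, if_pos h2]

lemma pvStep_method (hf hw hd : Bool) (arg : String)
    (h1 : ¬(arg = "--form" ∨ arg = "-f")) (h2 : PySem.Str.startswith arg "-" = false)
    (h4 : pvHttpieMethods.contains (PySem.Str.upper arg) = true) :
    pvAStep (hf, hw, hd, false) arg = (hf, hw || pvWriteMethods.contains (PySem.Str.upper arg), hd, false) := by
  unfold pvAStep; rw [if_neg h1, if_neg (by rw [h2]; exact Bool.false_ne_true), if_pos ⟨rfl, h4⟩]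

lemma pvStep_url (hf hw hd : Bool) (arg : String)
    (h1 : ¬(arg = "--form" ∨ arg = "-f")) (h2 : PySem.Str.startswith arg "-" = false)
    (h4 : pvHttpieMethods.contains (PySem.Str.upper arg) = false) :
    pvAStep (hf, hw, hd, false) arg = (hf, hw, hd, true) := by
  unfold pvAStep
  rw [if_neg h1, if_neg (by rw [h2]; exact Bool.false_ne_true),
    if_neg (by rw [h4]; rintro ⟨-, hx⟩; exact Bool.false_ne_true hx), if_pos rfl]

lemma pvStep_after_url (hf hw hd : Bool) (arg : String)
    (h1 : ¬(arg = "--form" ∨ arg = "-f")) (h2 : PySem.Str.startswith arg "-" = false) :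
    pvAStep (hf, hw, hd, true) arg = (hf, hw, hd || pvAData arg, true) := by
  unfold pvAStep
  rw [if_neg h1, if_neg (by rw [h2]; exact Bool.false_ne_true),
    if_neg (by rintro ⟨hx, -⟩; cases hx),
    if_neg (by rintro hx; cases hx)]
  cases hd2 : pvAData arg
  · rw [if_neg (by rw [show (PySem.Str.isIn "=" arg || PySem.Str.isIn ":=" arg || PySem.Str.isIn "@" arg) = pvAData arg from rfl, hd2]; exact Bool.false_ne_true), Bool.or_false]
  · rw [if_pos (by rw [show (PySem.Str.isIn "=" arg || PySem.Str.isIn ":=" arg || PySem.Str.isIn "@" arg) = pvAData arg from rfl, hd2]), Bool.or_true]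

-- cons lemmas for the B-side pieces
lemma pvAnyForm_cons_form (a : String) (rest : List String) (h : a = "--form" ∨ a = "-f") :
    pvAnyForm (a :: rest) = true := by
  rcases h with h | h <;> subst h <;> rfl

lemma pvAnyForm_cons_other (a : String) (rest : List String) (h : ¬(a = "--form" ∨ a = "-f")) :
    pvAnyForm (a :: rest) = pvAnyForm rest := by
  unfold pvAnyForm
  rw [List.any_cons, decide_eq_false (fun hx => h (Or.inl hx)),
    decide_eq_false (fun hx => h (Or.inr hx)), Bool.or_false, Bool.false_or]

lemma pvPositionals_cons_flag (a : String) (rest : List String)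
    (h : PySem.Str.startswith a "-" = true) :
    pvPositionals (a :: rest) = pvPositionals rest := by
  unfold pvPositionals
  rw [List.filter_cons, h]
  rfl

lemma pvPositionals_cons_pos (a : String) (rest : List String)
    (h : PySem.Str.startswith a "-" = false) :
    pvPositionals (a :: rest) = a :: pvPositionals rest := by
  unfold pvPositionals
  rw [List.filter_cons, h]
  rfl

lemma pvForm_is_flag (a : String) (h : a = "--form" ∨ a = "-f") :
    PySem.Str.startswith a "-" = true := by
  rcases h with h | h <;> subst h <;> decide

lemma pvBConsume_cons_method (p : String) (rest : List String) (hw : Bool)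
    (h : pvHttpieMethods.contains (PySem.Str.upper p) = true) :
    pvBConsume (p :: rest) hw = pvBConsume rest (hw || pvWriteMethods.contains (PySem.Str.upper p)) := by
  rw [pvBConsume, if_pos h]

lemma pvBConsume_cons_stop (p : String) (rest : List String) (hw : Bool)
    (h : pvHttpieMethods.contains (PySem.Str.upper p) = false) :
    pvBConsume (p :: rest) hw = (hw, p :: rest) := by
  rw [pvBConsume, if_neg (by rw [h]; exact Bool.false_ne_true)]

-- A's loop after the URL has been found
lemma pvFoldl_true (args : List String) (hf hw hd : Bool) :
    args.foldl pvAStep (hf, hw, hd, true) =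
      (hf || pvAnyForm args, hw, hd || (pvPositionals args).any pvAData, true) := by
  induction args generalizing hf hd with
  | nil => simp [pvAnyForm, pvPositionals]
  | cons a rest ih =>
    rw [List.foldl_cons]
    by_cases hform : a = "--form" ∨ a = "-f"
    · rw [pvStep_form _ _ _ _ _ hform, ih, pvAnyForm_cons_form _ _ hform,
        pvPositionals_cons_flag _ _ (pvForm_is_flag _ hform)]
      simp
    · rw [pvAnyForm_cons_other _ _ hform]
      cases hflag : PySem.Str.startswith a "-"
      · rw [pvStep_after_url _ _ _ _ hform hflag, ih, pvPositionals_cons_pos _ _ hflag,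
          List.any_cons, Bool.or_assoc]
      · rw [pvStep_flag _ _ _ _ _ hform hflag, ih, pvPositionals_cons_flag _ _ hflag]

-- A's loop before the URL has been found, against B's consume-then-scan
lemma pvFoldl_false (args : List String) (hf hw hd : Bool) :
    args.foldl pvAStep (hf, hw, hd, false) =
      (match pvBConsume (pvPositionals args) hw with
       | (hw', []) => (hf || pvAnyForm args, hw', hd, false)
       | (hw', _ :: tail) => (hf || pvAnyForm args, hw', hd || tail.any pvAData, true)) := by
  induction args generalizing hf hw with
  | nil => simp [pvAnyForm, pvPositionals, pvBConsume]
  | cons a rest ih =>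
    rw [List.foldl_cons]
    by_cases hform : a = "--form" ∨ a = "-f"
    · rw [pvStep_form _ _ _ _ _ hform, ih, pvAnyForm_cons_form _ _ hform,
        pvPositionals_cons_flag _ _ (pvForm_is_flag _ hform)]
      rcases pvBConsume (pvPositionals rest) hw with ⟨hw', rest'⟩
      cases rest' <;> simp
    · rw [pvAnyForm_cons_other _ _ hform]
      cases hflag : PySem.Str.startswith a "-"
      · rw [pvPositionals_cons_pos _ _ hflag]
        cases hm : pvHttpieMethods.contains (PySem.Str.upper a)
        · rw [pvStep_url _ _ _ _ hform hflag hm, pvFoldl_true, pvBConsume_cons_stop _ _ _ hm]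
        · rw [pvStep_method _ _ _ _ hform hflag hm, ih, pvBConsume_cons_method _ _ _ hm]
      · rw [pvStep_flag _ _ _ _ _ hform hflag, ih, pvPositionals_cons_flag _ _ hflag]

-- ===== VERDICT (by name: the statement is the Claim_ definition above) =====
theorem classify_httpie_py_spec : Claim_equal_classify_httpie_py := by
  intro tokens _
  cases tokens with
  | nil => rfl
  | cons t0 args =>
    unfold Spec_classify_httpie_py
    cases hc : pvHttpieCmds.contains t0
    · simp only [classify_httpie_py, classify_httpie_py_alt, hc]
      rfl
    · simp only [classify_httpie_py, classify_httpie_py_alt, hc]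
      rw [show (args.any (fun a => a = "--form" || a = "-f")) = pvAnyForm args from rfl,
        show (args.filter (fun a => !(PySem.Str.startswith a "-"))) = pvPositionals args from rfl,
        pvFoldl_false args false false false]
      rcases pvBConsume (pvPositionals args) false with ⟨hw', rest⟩
      cases rest with
      | nil =>
        cases hw' <;> cases haf : pvAnyForm args <;> simp only [haf] <;> rfl
      | cons u tail =>
        have hab : pvAData = pvBData := funext pvAData_eq_bData
        cases hw' <;> cases haf : pvAnyForm args <;> cases hdt : tail.any pvBData <;>
          simp only [hab, haf, hdt] <;> rfl
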